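-- pv_equiv track=rewrite | github.com/kamekamek/gakkoudayori-ai | backend/functions/adk_official_service.py | _extract_sections_from_html
-- ===== SOURCE A (Python) =====
-- from typing import Dict, Any, List, Optional
--
-- def _extract_sections_from_html(html_content: str) -> List[Dict[str, Any]]:
--     """HTMLから構造化されたセクションを抽出"""
--     sections = []
--
--     # html_contentが辞書の場合は文字列として処理
--     if isinstance(html_content, dict):
--         html_content = str(html_content)
--
--     # 簡単なHTMLパースing（実際のプロジェクトではBeautifulSoupを推奨）
--     lines = html_content.split('\n')
--     current_section = None
--
--     for line in lines:
--         line = line.strip()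
--         if '<h1' in line:
--             if current_section:
--                 sections.append(current_section)
--             current_section = {
--                 "type": "title",
--                 "content": line,
--                 "style": "heading"
--             }
--         elif '<h2' in line or '<h3' in line:
--             if current_section:
--                 sections.append(current_section)
--             current_section = {
--                 "type": "subtitle",
--                 "content": line,
--                 "style": "subheading"
--             }
--         elif '<p' in line and line != '<p>':
--             if current_section:
--                 sections.append(current_section)
--             current_section = {
--                 "type": "paragraph",
--                 "content": line,
--                 "style": "body_text"
--             }
--
--     if current_section:
--         sections.append(current_section)
--
--     return sections
-- ===== SOURCE B (Python) =====
-- def _extract_sections_from_html(html_content):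
--     if isinstance(html_content, dict):
--         html_content = str(html_content)
--     lines = [raw.strip() for raw in html_content.split('\n')]
--     # Three independent passes, one per section kind; each records (line index, dict).
--     hits = (
--         [(i, {"type": "title", "content": line, "style": "heading"})
--          for i, line in enumerate(lines) if '<h1' in line]
--         + [(i, {"type": "subtitle", "content": line, "style": "subheading"})
--            for i, line in enumerate(lines)
--            if '<h1' not in line and ('<h2' in line or '<h3' in line)]
--         + [(i, {"type": "paragraph", "content": line, "style": "body_text"})
--            for i, line in enumerate(lines)
--            if '<h1' not in line and '<h2' not in line and '<h3' not in line
--            and '<p' in line and line != '<p>']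
--     )
--     # Merge the passes back into document order by line index.
--     return [d for _, d in sorted(hits, key=lambda t: t[0])]
-- ===== Notes on version B (the rewrite author's own statement) =====
-- stated objective: alternative
-- what changed: Replaced A's single stateful pass with a pending-section buffer by three independent filtering passes (one per section kind, each collecting (line index, dict) pairs with explicit disjoint conditions) that are merged back into document order by sorting on the line index.
import Mathlib
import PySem

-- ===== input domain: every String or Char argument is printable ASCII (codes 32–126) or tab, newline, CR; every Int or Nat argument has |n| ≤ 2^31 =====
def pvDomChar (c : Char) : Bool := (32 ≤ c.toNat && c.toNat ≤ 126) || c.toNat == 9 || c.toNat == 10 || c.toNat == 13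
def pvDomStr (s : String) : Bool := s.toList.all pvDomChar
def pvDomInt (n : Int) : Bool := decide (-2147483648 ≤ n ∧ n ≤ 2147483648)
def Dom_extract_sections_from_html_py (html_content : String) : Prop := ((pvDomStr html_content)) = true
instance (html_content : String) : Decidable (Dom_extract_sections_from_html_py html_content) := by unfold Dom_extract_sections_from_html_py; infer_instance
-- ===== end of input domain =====

-- B replaces A's single stateful pass (pending-section buffer) by three independent
-- filtering passes, one per section kind, merged back into document order by sorting
-- on the line index; same return value.

-- ===== PORT A =====
def extract_sections_from_html_py (html_content : String) : List (List (String × String)) :=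
  let lines := ((PySem.Str.split? html_content "\n").getD [])  -- sep "\n" ≠ "": split? is always some here
  let st := lines.foldl
    (fun (st : List (List (String × String)) × Option (List (String × String))) l =>
      let line := PySem.Str.strip l
      if PySem.Str.isIn "<h1" line then
        (st.1 ++ st.2.toList, some [("type", "title"), ("content", line), ("style", "heading")])
      else if PySem.Str.isIn "<h2" line || PySem.Str.isIn "<h3" line then
        (st.1 ++ st.2.toList, some [("type", "subtitle"), ("content", line), ("style", "subheading")])
      else if PySem.Str.isIn "<p" line && line != "<p>" then
        (st.1 ++ st.2.toList, some [("type", "paragraph"), ("content", line), ("style", "body_text")])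
      else st)
    ([], none)
  st.1 ++ st.2.toList

-- ===== PORT B =====
-- the three (disjoint) comprehension conditions of Source B
def pvF1 (p : Int × String) : Option (Int × List (String × String)) :=
  if PySem.Str.isIn "<h1" p.2 then
    some (p.1, [("type", "title"), ("content", p.2), ("style", "heading")])
  else none

def pvF2 (p : Int × String) : Option (Int × List (String × String)) :=
  if !PySem.Str.isIn "<h1" p.2 && (PySem.Str.isIn "<h2" p.2 || PySem.Str.isIn "<h3" p.2) then
    some (p.1, [("type", "subtitle"), ("content", p.2), ("style", "subheading")])
  else none

def pvF3 (p : Int × String) : Option (Int × List (String × String)) :=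
  if !PySem.Str.isIn "<h1" p.2 && !PySem.Str.isIn "<h2" p.2 && !PySem.Str.isIn "<h3" p.2
      && PySem.Str.isIn "<p" p.2 && p.2 != "<p>" then
    some (p.1, [("type", "paragraph"), ("content", p.2), ("style", "body_text")])
  else none

def extract_sections_from_html_py_alt (html_content : String) : List (List (String × String)) :=
  -- sep "\n" ≠ "": split? is always some here
  let lines := ((PySem.Str.split? html_content "\n").getD []).map PySem.Str.strip
  let E := PySem.List.enumerate lines
  let hits := E.filterMap pvF1 ++ E.filterMap pvF2 ++ E.filterMap pvF3
  (PySem.List.sorted hits (fun t => t.1) false).map (·.2)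

-- ===== PRECONDITION & SPEC =====
def Spec_extract_sections_from_html_py (html_content : String) (out : List (List (String × String))) : Prop := out = extract_sections_from_html_py_alt html_content
instance (html_content : String) (out : List (List (String × String))) : Decidable (Spec_extract_sections_from_html_py html_content out) := by unfold Spec_extract_sections_from_html_py; infer_instance

-- ===== CLAIM (what is proved, stated in full; the proofs are below) =====
def Claim_equal_extract_sections_from_html_py : Prop := ∀ (html_content : String), Dom_extract_sections_from_html_py html_content → Spec_extract_sections_from_html_py html_content (extract_sections_from_html_py html_content)

-- ===== LEMMAS AND PROOFS =====

-- the common classification of one stripped line (proof-only abbreviation)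
def pvClassify (line : String) : Option (List (String × String)) :=
  if PySem.Str.isIn "<h1" line then
    some [("type", "title"), ("content", line), ("style", "heading")]
  else if PySem.Str.isIn "<h2" line || PySem.Str.isIn "<h3" line then
    some [("type", "subtitle"), ("content", line), ("style", "subheading")]
  else if PySem.Str.isIn "<p" line && line != "<p>" then
    some [("type", "paragraph"), ("content", line), ("style", "body_text")]
  else none

def pvG (p : Int × String) : Option (Int × List (String × String)) :=
  (pvClassify p.2).map (fun d => (p.1, d))

-- A's loop step equals: keep the state on a non-matching line, else flush and hold the dict.
lemma pvStepEq (st : List (List (String × String)) × Option (List (String × String))) (l : String) :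
    (let line := PySem.Str.strip l
      if PySem.Str.isIn "<h1" line then
        (st.1 ++ st.2.toList, some [("type", "title"), ("content", line), ("style", "heading")])
      else if PySem.Str.isIn "<h2" line || PySem.Str.isIn "<h3" line then
        (st.1 ++ st.2.toList, some [("type", "subtitle"), ("content", line), ("style", "subheading")])
      else if PySem.Str.isIn "<p" line && line != "<p>" then
        (st.1 ++ st.2.toList, some [("type", "paragraph"), ("content", line), ("style", "body_text")])
      else st) =
    (match pvClassify (PySem.Str.strip l) with
      | some d => (st.1 ++ st.2.toList, some d)
      | none => st) := by
  simp only [pvClassify]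
  split_ifs <;> rfl

-- Loop invariant for A: flushed fold = sections so far ++ direct classification of the rest.
lemma pvInvariant (lines : List String)
    (st : List (List (String × String)) × Option (List (String × String))) :
    (lines.foldl
      (fun (st : List (List (String × String)) × Option (List (String × String))) l =>
        let line := PySem.Str.strip l
        if PySem.Str.isIn "<h1" line then
          (st.1 ++ st.2.toList, some [("type", "title"), ("content", line), ("style", "heading")])
        else if PySem.Str.isIn "<h2" line || PySem.Str.isIn "<h3" line then
          (st.1 ++ st.2.toList, some [("type", "subtitle"), ("content", line), ("style", "subheading")])
        else if PySem.Str.isIn "<p" line && line != "<p>" then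
          (st.1 ++ st.2.toList, some [("type", "paragraph"), ("content", line), ("style", "body_text")])
        else st)
      st).1 ++
    (lines.foldl
      (fun (st : List (List (String × String)) × Option (List (String × String))) l =>
        let line := PySem.Str.strip l
        if PySem.Str.isIn "<h1" line then
          (st.1 ++ st.2.toList, some [("type", "title"), ("content", line), ("style", "heading")])
        else if PySem.Str.isIn "<h2" line || PySem.Str.isIn "<h3" line then
          (st.1 ++ st.2.toList, some [("type", "subtitle"), ("content", line), ("style", "subheading")])
        else if PySem.Str.isIn "<p" line && line != "<p>" then
          (st.1 ++ st.2.toList, some [("type", "paragraph"), ("content", line), ("style", "body_text")])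
        else st)
      st).2.toList =
    st.1 ++ st.2.toList ++ lines.filterMap (fun raw => pvClassify (PySem.Str.strip raw)) := by
  induction lines generalizing st with
  | nil => simp
  | cons l t ih =>
    simp only [List.foldl_cons, List.filterMap_cons, pvStepEq st l]
    cases h : pvClassify (PySem.Str.strip l) with
    | none => exact ih st
    | some d => rw [ih]; simp

-- the three passes of B are disjoint and together compute pvG
lemma pvF1_g (p : Int × String) (h : pvF1 p ≠ none) :
    pvG p = pvF1 p ∧ pvF2 p = none ∧ pvF3 p = none := by
  simp only [pvF1, pvF2, pvF3, pvG, pvClassify] at *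
  split_ifs at * <;> simp_all

lemma pvF2_g (p : Int × String) (h1 : pvF1 p = none) (h : pvF2 p ≠ none) :
    pvG p = pvF2 p ∧ pvF3 p = none := by
  simp only [pvF1, pvF2, pvF3, pvG, pvClassify] at *
  split_ifs at * <;> simp_all

lemma pvF3_g (p : Int × String) (h1 : pvF1 p = none) (h2 : pvF2 p = none) :
    pvG p = pvF3 p := by
  simp only [pvF1, pvF2, pvF3, pvG, pvClassify] at *
  split_ifs at * <;> simp_all

-- the concatenation of the three passes is a permutation of the single classifying pass
lemma pvPerm3 (E : List (Int × String)) :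
    (E.filterMap pvF1 ++ E.filterMap pvF2 ++ E.filterMap pvF3).Perm (E.filterMap pvG) := by
  induction E with
  | nil => simp
  | cons x E ih =>
    simp only [List.filterMap_cons]
    cases h1 : pvF1 x with
    | some a =>
      obtain ⟨hg, h2, h3⟩ := pvF1_g x (by simp [h1])
      simp only [h1, h2, h3, hg]
      simpa using ih.cons a
    | none =>
      cases h2 : pvF2 x with
      | some a =>
        obtain ⟨hg, h3⟩ := pvF2_g x h1 (by simp [h2])
        simp only [h2, h3, hg]
        refine List.Perm.trans ?_ (ih.cons a)
        simp [List.append_assoc]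
      | none =>
        have hg := pvF3_g x h1 h2
        simp only [hg]
        cases h3 : pvF3 x with
        | none => simpa using ih
        | some a =>
          refine List.Perm.trans ?_ (ih.cons a)
          simpa [List.append_assoc] using
            (List.perm_middle (a := a) (l₁ := E.filterMap pvF1 ++ E.filterMap pvF2)
              (l₂ := E.filterMap pvF3))

-- pvG keeps the index, so the single pass over enumerate is strictly index-increasing
lemma pvPairwiseG (E : List (Int × String)) (hE : E.Pairwise (fun a b => a.1 < b.1)) :
    (E.filterMap pvG).Pairwise (fun a b => a.1 < b.1) := by
  induction E with
  | nil => simp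
  | cons x E ih =>
    rcases List.pairwise_cons.mp hE with ⟨hx, hE'⟩
    simp only [List.filterMap_cons]
    cases h : pvG x with
    | none => exact ih hE'
    | some a =>
      have ha : a.1 = x.1 := by
        simp only [pvG, Option.map_eq_some_iff] at h
        obtain ⟨d, _, rfl⟩ := h
        rfl
      refine List.pairwise_cons.mpr ⟨?_, ih hE'⟩
      intro b hb
      rcases List.mem_filterMap.mp hb with ⟨y, hy, hby⟩
      have hb1 : b.1 = y.1 := by
        simp only [pvG, Option.map_eq_some_iff] at hby
        obtain ⟨d, _, rfl⟩ := hby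
        rfl
      rw [ha, hb1]; exact hx y hy

-- mapping snd over the merged indexed pass gives the plain classification of the lines
lemma pvMapSnd (lines : List String) (s : Int) :
    ((PySem.List.enumerate lines s).filterMap pvG).map (·.2) = lines.filterMap pvClassify := by
  induction lines generalizing s with
  | nil => simp [PySem.List.enumerate_nil]
  | cons l t ih =>
    have h1 : pvG (s, l) = (pvClassify l).map (fun d => (s, d)) := rfl
    rw [PySem.List.enumerate_cons, List.filterMap_cons, List.filterMap_cons, h1]
    cases h : pvClassify l <;> simp [ih (s + 1)]

-- ===== VERDICT (by name: the statement is the Claim_ definition above) =====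
theorem extract_sections_from_html_py_spec : Claim_equal_extract_sections_from_html_py := by
  intro html_content _
  unfold Spec_extract_sections_from_html_py
  simp only [extract_sections_from_html_py, extract_sections_from_html_py_alt]
  rw [PySem.List.sorted_eq_of_perm_of_pairwise_lt _ _ _ ((pvPerm3 _).symm)
        (pvPairwiseG _ (PySem.List.pairwise_lt_enumerate _ _)),
      pvMapSnd, List.filterMap_map]
  simpa using pvInvariant ((PySem.Str.split? html_content "\n").getD []) ([], none)
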